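-- pv_equiv track=rewrite | github.com/ThiagoReis1/questions-irt-calculator | code-analytics/Etapa_4/codebench-analytics-full/codebench_analytics/utils/code_diff.py | code_diff
-- ===== SOURCE A (Python) =====
-- def code_diff(prev_code: list[str], cur_code: list[str]) -> int:
--     diff = 0
--     n = len(prev_code)
--     m = len(cur_code)
--     for i in range(n):
--         prev_line = prev_code[i]
--         cur_line = cur_code[i] if i < m else ""
--         diff += sum(1 for a, b in zip(prev_line, cur_line) if a != b) + abs(
--             len(prev_line) - len(cur_line)
--         )
--
--     for i in range(n, m):
--         diff += len(cur_code[i])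
--     return diff
-- ===== SOURCE B (Python) =====
-- def code_diff(prev_code: list[str], cur_code: list[str]) -> int:
--     # Column-major strategy: pad the shorter list with empty lines, then scan
--     # character COLUMNS (position j across all line pairs) instead of lines;
--     # each (line, position) cell contributes 1 iff the characters differ or
--     # exactly one side has a character there.
--     k = max(len(prev_code), len(cur_code))
--     rows = [(prev_code[i] if i < len(prev_code) else "",
--              cur_code[i] if i < len(cur_code) else "")
--             for i in range(k)]
--     width = max((max(len(p), len(c)) for p, c in rows), default=0)
--     total = 0
--     for j in range(width):
--         for p, c in rows:
--             if j < len(p) and j < len(c):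
--                 if p[j] != c[j]:
--                     total += 1
--             elif j < len(p) or j < len(c):
--                 total += 1
--     return total
-- ===== Notes on version B (the rewrite author's own statement) =====
-- stated objective: alternative
-- what changed: A sums mismatches line by line (row-major, with an i<m guard and a separate trailing loop); B pads both lists once and then iterates over character COLUMNS, counting for each position j across all line pairs the cells where the characters differ or only one side has a character.
import Mathlib
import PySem

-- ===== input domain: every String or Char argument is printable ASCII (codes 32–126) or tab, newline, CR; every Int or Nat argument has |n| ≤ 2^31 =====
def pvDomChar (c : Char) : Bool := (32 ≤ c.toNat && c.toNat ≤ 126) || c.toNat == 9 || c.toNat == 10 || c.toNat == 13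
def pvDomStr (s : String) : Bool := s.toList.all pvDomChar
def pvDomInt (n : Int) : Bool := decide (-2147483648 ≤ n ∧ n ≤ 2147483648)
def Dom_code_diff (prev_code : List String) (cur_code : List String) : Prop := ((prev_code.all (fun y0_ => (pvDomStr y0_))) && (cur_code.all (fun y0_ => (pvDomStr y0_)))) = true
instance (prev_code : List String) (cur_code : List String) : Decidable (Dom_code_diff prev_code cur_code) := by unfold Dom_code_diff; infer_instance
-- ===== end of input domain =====

-- B replaces A's row-major line loop (+ trailing loop) by padding both lists once and
-- scanning character COLUMNS: for each position j it counts, over all line pairs, the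
-- cells where the characters differ or only one side has a character (objective: alternative).

-- ===== PORT A =====
def code_diff (prev_code : List String) (cur_code : List String) : Int :=
  let diff : Int := 0
  let n := PySem.List.len prev_code
  let m := PySem.List.len cur_code
  let diff := (PySem.List.pyRange 0 n 1).foldl (fun diff i =>
      let prev_line := PySem.List.pyGetD prev_code i ""
      let cur_line := if i < m then PySem.List.pyGetD cur_code i "" else ""
      diff + (((List.zip prev_line.toList cur_line.toList).countP
                 (fun ab => ab.1 != ab.2) : Int)
              + |PySem.Str.len prev_line - PySem.Str.len cur_line|)) diff
  (PySem.List.pyRange n m 1).foldl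
    (fun diff i => diff + PySem.Str.len (PySem.List.pyGetD cur_code i "")) diff

-- ===== PORT B =====
-- p[j] (guarded by 'j < len(p)' in Source B, so always in range) is ported as toList.getD j ' ' — exact under the guard.
def code_diff_alt (prev_code : List String) (cur_code : List String) : Int :=
  let k := max prev_code.length cur_code.length
  let rows := (List.range k).map (fun i =>
      ((if i < prev_code.length then prev_code.getD i "" else ""),
       (if i < cur_code.length then cur_code.getD i "" else "")))
  let width := (rows.map (fun pc => max pc.1.toList.length pc.2.toList.length)).foldr max 0
  (List.range width).foldl (fun total j =>
    rows.foldl (fun total pc =>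
      if j < pc.1.toList.length ∧ j < pc.2.toList.length then
        (if pc.1.toList.getD j ' ' != pc.2.toList.getD j ' ' then total + 1 else total)
      else if j < pc.1.toList.length ∨ j < pc.2.toList.length then total + 1
      else total) total) 0

-- ===== PRECONDITION & SPEC =====
def Spec_code_diff (prev_code : List String) (cur_code : List String) (out : Int) : Prop := out = code_diff_alt prev_code cur_code
instance (prev_code : List String) (cur_code : List String) (out : Int) : Decidable (Spec_code_diff prev_code cur_code out) := by unfold Spec_code_diff; infer_instance

-- ===== CLAIM (what is proved, stated in full; the proofs are below) =====
def Claim_equal_code_diff : Prop := ∀ (prev_code : List String) (cur_code : List String), Dom_code_diff prev_code cur_code → Spec_code_diff prev_code cur_code (code_diff prev_code cur_code)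

-- ===== LEMMAS AND PROOFS =====

-- per-line diff as A computes it
def dA (p c : String) : Int :=
  ((List.zip p.toList c.toList).countP (fun ab => ab.1 != ab.2) : Int)
  + |PySem.Str.len p - PySem.Str.len c|

-- the common value: structural recursion over both lists at once
def F : List String → List String → Int
  | [], [] => 0
  | [], c :: cs => dA "" c + F [] cs
  | p :: ps, [] => dA p "" + F ps []
  | p :: ps, c :: cs => dA p c + F ps cs

theorem dA_nil_left (c : String) : dA "" c = PySem.Str.len c := by
  simp [dA, PySem.Str.len_eq]

-- A as a pair of Nat-indexed range sums
def SA (prev_code cur_code : List String) : Int :=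
  ((List.range prev_code.length).map (fun i =>
      dA (prev_code.getD i "") (if i < cur_code.length then cur_code.getD i "" else ""))).sum
  + ((List.range (cur_code.length - prev_code.length)).map (fun k =>
      PySem.Str.len (cur_code.getD (prev_code.length + k) ""))).sum

theorem code_diff_eq_SA (prev_code cur_code : List String) :
    code_diff prev_code cur_code = SA prev_code cur_code := by
  show (PySem.List.pyRange (PySem.List.len prev_code) (PySem.List.len cur_code) 1).foldl
    (fun diff i => diff + PySem.Str.len (PySem.List.pyGetD cur_code i ""))
    ((PySem.List.pyRange 0 (PySem.List.len prev_code) 1).foldl (fun diff i =>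
      diff + (((List.zip (PySem.List.pyGetD prev_code i "").toList
            (if i < PySem.List.len cur_code then PySem.List.pyGetD cur_code i "" else "").toList).countP
                 (fun ab => ab.1 != ab.2) : Int)
              + |PySem.Str.len (PySem.List.pyGetD prev_code i "")
                 - PySem.Str.len (if i < PySem.List.len cur_code then PySem.List.pyGetD cur_code i "" else "")|)) 0)
    = SA prev_code cur_code
  rw [PySem.List.foldl_add, PySem.List.foldl_add, zero_add]
  unfold SA
  congr 1
  · -- first loop
    simp only [PySem.List.len_eq]
    rw [PySem.List.pyRange_one]
    have hn : ((prev_code.length : Int) - 0).toNat = prev_code.length := by omega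
    rw [hn, List.map_map]
    refine congrArg List.sum (List.map_congr_left ?_)
    intro k hk
    have hk' : k < prev_code.length := List.mem_range.mp hk
    have hz : ((0:Int) + (k:Int)) = ((k : Nat) : Int) := by ring
    simp only [Function.comp, hz, PySem.List.pyGetD_natCast, Nat.cast_lt, dA]
  · -- trailing loop
    simp only [PySem.List.len_eq]
    rw [PySem.List.pyRange_one]
    have hm : ((cur_code.length : Int) - (prev_code.length : Int)).toNat
        = cur_code.length - prev_code.length := by omega
    rw [hm, List.map_map]
    refine congrArg List.sum (List.map_congr_left ?_)
    intro k hk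
    have hz : ((prev_code.length : Int) + (k:Int)) = ((prev_code.length + k : Nat) : Int) := by
      push_cast
      ring
    simp only [Function.comp, hz, PySem.List.pyGetD_natCast]

-- split a range-indexed sum at index 0
theorem map_range_succ {α : Type} (f : Nat → α) (n : Nat) :
    (List.range (n+1)).map f = f 0 :: (List.range n).map (fun j => f (j+1)) := by
  rw [List.range_succ_eq_map, List.map_cons, List.map_map]
  rfl

theorem cons_congr {α : Type} {a b : α} {l m : List α} (h1 : a = b) (h2 : l = m) :
    a :: l = b :: m := by rw [h1, h2]

theorem add_congr {a b c d : Int} (h1 : a = b) (h2 : c = d) : a + c = b + d := by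
  rw [h1, h2]

theorem pair_congr {α β : Type} {a b : α} {c d : β} (h1 : a = b) (h2 : c = d) :
    (a, c) = (b, d) := by rw [h1, h2]

theorem sum_map_congr (n : Nat) (f g : Nat → Int) (h : ∀ j, f j = g j) :
    ((List.range n).map f).sum = ((List.range n).map g).sum := by
  rw [funext h]

theorem SA_nil_tail : ∀ (cur_code : List String),
    ((List.range cur_code.length).map (fun k =>
        PySem.Str.len (cur_code.getD k ""))).sum = F [] cur_code := by
  intro cur_code
  induction cur_code with
  | nil => simp [F]
  | cons c cs ih =>
    rw [show (c :: cs).length = cs.length + 1 from rfl,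
      map_range_succ (fun k => PySem.Str.len ((c :: cs).getD k "")) cs.length,
      List.sum_cons, F, dA_nil_left, ← ih]
    all_goals exact add_congr (by rw [List.getD_cons_zero]) (sum_map_congr _ _ _ (fun j => by rw [List.getD_cons_succ]))

theorem SA_nil (cur_code : List String) : SA [] cur_code = F [] cur_code := by
  unfold SA
  have hr1 : List.range (([] : List String).length) = [] := by simp
  have hr2 : List.range (cur_code.length - ([] : List String).length)
      = List.range cur_code.length := by simp
  rw [hr1, List.map_nil, List.sum_nil, zero_add, hr2, ← SA_nil_tail cur_code]
  all_goals exact sum_map_congr _ _ _ (fun k => by rw [show ([] : List String).length + k = k by simp])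

theorem SA_cons_nil (p : String) (ps : List String) :
    SA (p :: ps) [] = dA p "" + SA ps [] := by
  unfold SA
  rw [show (p :: ps).length = ps.length + 1 from rfl]
  have hr : List.range (([] : List String).length - (ps.length + 1)) = [] := by simp
  have hr2 : List.range (([] : List String).length - ps.length) = [] := by simp
  rw [hr, hr2]
  simp only [List.map_nil, List.sum_nil, add_zero]
  rw [map_range_succ (fun i =>
      dA ((p :: ps).getD i "")
        (if i < ([] : List String).length then ([] : List String).getD i "" else "")) ps.length,
    List.sum_cons]
  all_goals exact add_congr (by rw [if_neg (by simp), List.getD_cons_zero]) (sum_map_congr _ _ _ (fun j => by rw [List.getD_cons_succ, if_neg (by simp), if_neg (by simp)]))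

theorem SA_cons_cons (p c : String) (ps cs : List String) :
    SA (p :: ps) (c :: cs) = dA p c + SA ps cs := by
  unfold SA
  rw [show (p :: ps).length = ps.length + 1 from rfl]
  have hr : List.range ((c :: cs).length - (ps.length + 1)) = List.range (cs.length - ps.length) := by
    simp
  rw [hr,
    map_range_succ (fun i =>
      dA ((p :: ps).getD i "")
        (if i < (c :: cs).length then (c :: cs).getD i "" else "")) ps.length,
    List.sum_cons]
  have h1 : ∀ j, dA ((p :: ps).getD (j+1) "")
      (if j + 1 < (c :: cs).length then (c :: cs).getD (j+1) "" else "")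
      = dA (ps.getD j "") (if j < cs.length then cs.getD j "" else "") := by
    intro j
    rw [List.getD_cons_succ]
    by_cases h : j < cs.length
    · rw [if_pos (show j + 1 < (c :: cs).length by simp; omega), if_pos h, List.getD_cons_succ]
    · rw [if_neg (show ¬ (j + 1 < (c :: cs).length) by simp; omega), if_neg h]
  have h2 : ∀ k, PySem.Str.len ((c :: cs).getD (ps.length + 1 + k) "")
      = PySem.Str.len (cs.getD (ps.length + k) "") := by
    intro k
    rw [show ps.length + 1 + k = (ps.length + k) + 1 by omega, List.getD_cons_succ]
  rw [sum_map_congr _ _ _ h1, sum_map_congr _ _ _ h2]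
  have hf0 : dA ((p :: ps).getD 0 "")
      (if 0 < (c :: cs).length then (c :: cs).getD 0 "" else "") = dA p c := by
    rw [if_pos (by simp), List.getD_cons_zero, List.getD_cons_zero]
  rw [hf0]
  ring

theorem SA_eq_F (prev_code : List String) : ∀ cur_code,
    SA prev_code cur_code = F prev_code cur_code := by
  induction prev_code with
  | nil => exact SA_nil
  | cons p ps ih =>
    intro cur_code
    cases cur_code with
    | nil => rw [SA_cons_nil, F, ih []]
    | cons c cs => rw [SA_cons_cons, F, ih cs]

theorem code_diff_eq_F (prev_code cur_code : List String) :
    code_diff prev_code cur_code = F prev_code cur_code := by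
  rw [code_diff_eq_SA, SA_eq_F]

-- ===== B side =====

-- the contribution of column j to line pair pc (B's inner-loop increment)
def cell (j : Nat) (pc : String × String) : Int :=
  if j < pc.1.toList.length ∧ j < pc.2.toList.length then
    (if pc.1.toList.getD j ' ' != pc.2.toList.getD j ' ' then 1 else 0)
  else if j < pc.1.toList.length ∨ j < pc.2.toList.length then 1
  else 0

theorem foldl_add_gen {α : Type} (l : List α) (f : α → Int) (t : Int) :
    l.foldl (fun acc x => acc + f x) t = t + (l.map f).sum := by
  induction l generalizing t with
  | nil => simp
  | cons x xs ih => simp [List.foldl_cons, ih, add_assoc]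

theorem inner_foldl_eq (j : Nat) (rows : List (String × String)) (t : Int) :
    rows.foldl (fun total pc =>
      if j < pc.1.toList.length ∧ j < pc.2.toList.length then
        (if pc.1.toList.getD j ' ' != pc.2.toList.getD j ' ' then total + 1 else total)
      else if j < pc.1.toList.length ∨ j < pc.2.toList.length then total + 1
      else total) t
    = t + (rows.map (cell j)).sum := by
  have hf : (fun (total : Int) pc =>
      if j < pc.1.toList.length ∧ j < pc.2.toList.length then
        (if pc.1.toList.getD j ' ' != pc.2.toList.getD j ' ' then total + 1 else total)
      else if j < pc.1.toList.length ∨ j < pc.2.toList.length then total + 1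
      else total)
      = fun (total : Int) pc => total + cell j pc := by
    funext t pc
    unfold cell
    split_ifs <;> simp
  rw [hf, foldl_add_gen]

theorem sum_map_add {α : Type} (l : List α) (f g : α → Int) :
    (l.map (fun x => f x + g x)).sum = (l.map f).sum + (l.map g).sum := by
  induction l with
  | nil => simp
  | cons x xs ih => simp only [List.map_cons, List.sum_cons, ih]; ring

theorem sum_swap {α β : Type} (l1 : List α) (l2 : List β) (f : α → β → Int) :
    (l1.map (fun x => (l2.map (f x)).sum)).sum
      = (l2.map (fun y => (l1.map (fun x => f x y)).sum)).sum := by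
  induction l1 with
  | nil => simp
  | cons x xs ih =>
    simp only [List.map_cons, List.sum_cons, ih, sum_map_add]

-- a member is bounded by the foldr max
theorem le_foldr_max (l : List Nat) (x : Nat) (hx : x ∈ l) : x ≤ l.foldr max 0 := by
  induction l with
  | nil => cases hx
  | cons a as ih =>
    rcases List.mem_cons.mp hx with h | h
    · rw [h, List.foldr_cons]; omega
    · have := ih h
      rw [List.foldr_cons]
      omega

-- Σ_{j<w} (if j<n then 1 else 0) = min n w
theorem sum_indicator (w n : Nat) :
    ((List.range w).map (fun j => if j < n then (1:Int) else 0)).sum = (min n w : Nat) := by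
  induction w with
  | zero => simp
  | succ w ih =>
    rw [List.range_succ, List.map_append, List.sum_append, ih]
    by_cases h : w < n
    · simp only [List.map_cons, List.map_nil, if_pos h, List.sum_cons, List.sum_nil]
      have : min n (w+1) = min n w + 1 := by omega
      rw [this]; push_cast; ring
    · simp only [List.map_cons, List.map_nil, if_neg h, List.sum_cons, List.sum_nil]
      have : min n (w+1) = min n w := by omega
      rw [this]; ring

-- char-list versions
def cellL (j : Nat) (lp lc : List Char) : Int :=
  if j < lp.length ∧ j < lc.length then
    (if lp.getD j ' ' != lc.getD j ' ' then 1 else 0)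
  else if j < lp.length ∨ j < lc.length then 1
  else 0

def dAL (lp lc : List Char) : Int :=
  ((List.zip lp lc).countP (fun ab => ab.1 != ab.2) : Int)
  + |(lp.length : Int) - (lc.length : Int)|

theorem cell_eq_cellL (j : Nat) (pc : String × String) :
    cell j pc = cellL j pc.1.toList pc.2.toList := rfl

theorem dA_eq_dAL (p c : String) : dA p c = dAL p.toList c.toList := by
  simp [dA, dAL, PySem.Str.len_eq]

theorem rowL (lp : List Char) : ∀ (lc : List Char) (w : Nat),
    max lp.length lc.length ≤ w →
    ((List.range w).map (fun j => cellL j lp lc)).sum = dAL lp lc := by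
  induction lp with
  | nil =>
    intro lc w hw
    have hcell : ∀ j, cellL j [] lc = if j < lc.length then (1:Int) else 0 := by
      intro j; simp [cellL]
    simp only [hcell]
    rw [sum_indicator]
    have hmin : min lc.length w = lc.length := by simp at hw; omega
    rw [hmin]
    simp only [dAL, List.zip_nil_left, List.countP_nil, Nat.cast_zero, List.length_nil,
      zero_add, zero_sub, abs_neg]
    rw [abs_of_nonneg (by positivity)]
  | cons a lp ih =>
    intro lc w hw
    cases lc with
    | nil =>
      have hcell : ∀ j, cellL j (a :: lp) [] = if j < (a :: lp).length then (1:Int) else 0 := by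
        intro j; simp [cellL]
      simp only [hcell]
      rw [sum_indicator]
      have hmin : min (a :: lp).length w = (a :: lp).length := by simp at hw ⊢; omega
      rw [hmin]
      simp only [dAL, List.zip_nil_right, List.countP_nil, Nat.cast_zero, zero_add,
        List.length_nil, Nat.cast_zero, sub_zero, List.length_cons]
      rw [abs_of_nonneg (by positivity)]
    | cons b lc =>
      obtain ⟨w', rfl⟩ : ∃ w', w = w' + 1 := by
        cases w with
        | zero => simp at hw
        | succ w' => exact ⟨w', rfl⟩
      rw [List.range_succ_eq_map, List.map_cons, List.map_map, List.sum_cons]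
      have hcomp : (fun j => cellL j (a :: lp) (b :: lc)) ∘ Nat.succ
          = fun j => cellL j lp lc := by
        funext j
        simp only [Function.comp_apply, cellL, List.length_cons, Nat.succ_eq_add_one,
          Nat.add_lt_add_iff_right, List.getD_cons_succ]
      have hmap : ((List.range w').map (fun j => cellL j lp lc)).sum = dAL lp lc := by
        apply ih
        simp at hw ⊢; omega
      rw [hcomp, hmap]
      have h0 : cellL 0 (a :: lp) (b :: lc) = (if a != b then 1 else 0) := by
        simp [cellL]
      rw [h0]
      simp only [dAL, List.zip_cons_cons, List.countP_cons, List.length_cons]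
      have habs : |((lp.length + 1 : Nat) : Int) - ((lc.length + 1 : Nat) : Int)|
          = |(lp.length : Int) - (lc.length : Int)| := by
        push_cast
        congr 1; ring
      rw [habs]
      by_cases hab : (a != b) = true
      · simp only [hab, if_true]
        push_cast
        ring
      · simp only [hab]
        push_cast
        ring

-- rows built by B = structural zip-with-padding
def zipPad : List String → List String → List (String × String)
  | [], [] => []
  | [], c :: cs => ("", c) :: zipPad [] cs
  | p :: ps, [] => (p, "") :: zipPad ps []
  | p :: ps, c :: cs => (p, c) :: zipPad ps cs

def rowsOf (prev_code cur_code : List String) : List (String × String) :=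
  (List.range (max prev_code.length cur_code.length)).map (fun i =>
      ((if i < prev_code.length then prev_code.getD i "" else ""),
       (if i < cur_code.length then cur_code.getD i "" else "")))

theorem rowsOf_eq_zipPad (prev_code : List String) : ∀ cur_code,
    rowsOf prev_code cur_code = zipPad prev_code cur_code := by
  induction prev_code with
  | nil =>
    intro cur_code
    induction cur_code with
    | nil => simp [rowsOf, zipPad]
    | cons c cs ih =>
      rw [zipPad, ← ih]
      unfold rowsOf
      rw [show max ([] : List String).length (c :: cs).length = cs.length + 1 by simp,
        show max ([] : List String).length cs.length = cs.length by simp,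
        map_range_succ (fun i =>
          ((if i < ([] : List String).length then ([] : List String).getD i "" else ""),
           (if i < (c :: cs).length then (c :: cs).getD i "" else ""))) cs.length]
      all_goals exact cons_congr (by simp) (List.map_congr_left (fun j _ => pair_congr (by simp) (by simp only [List.length_cons, Nat.add_lt_add_iff_right, List.getD_cons_succ])))
  | cons p ps ih =>
    intro cur_code
    cases cur_code with
    | nil =>
      rw [zipPad, ← ih []]
      unfold rowsOf
      rw [show max (p :: ps).length ([] : List String).length = ps.length + 1 by simp,
        show max ps.length ([] : List String).length = ps.length by simp,
        map_range_succ (fun i =>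
          ((if i < (p :: ps).length then (p :: ps).getD i "" else ""),
           (if i < ([] : List String).length then ([] : List String).getD i "" else ""))) ps.length]
      all_goals exact cons_congr (by simp) (List.map_congr_left (fun j _ => pair_congr (by simp only [List.length_cons, Nat.add_lt_add_iff_right, List.getD_cons_succ]) (by simp)))
    | cons c cs =>
      rw [zipPad, ← ih cs]
      unfold rowsOf
      rw [show max (p :: ps).length (c :: cs).length = max ps.length cs.length + 1 by
          simp [Nat.succ_max_succ],
        map_range_succ (fun i =>
          ((if i < (p :: ps).length then (p :: ps).getD i "" else ""),
           (if i < (c :: cs).length then (c :: cs).getD i "" else ""))) (max ps.length cs.length)]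
      all_goals exact cons_congr (by simp) (List.map_congr_left (fun j _ => pair_congr (by simp only [List.length_cons, Nat.add_lt_add_iff_right, List.getD_cons_succ]) (by simp only [List.length_cons, Nat.add_lt_add_iff_right, List.getD_cons_succ])))

theorem sum_zipPad_dA (prev_code : List String) : ∀ cur_code,
    ((zipPad prev_code cur_code).map (fun pc => dA pc.1 pc.2)).sum = F prev_code cur_code := by
  induction prev_code with
  | nil =>
    intro cur_code
    induction cur_code with
    | nil => simp [zipPad, F]
    | cons c cs ih => rw [zipPad, F, List.map_cons, List.sum_cons, ih]
  | cons p ps ih =>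
    intro cur_code
    cases cur_code with
    | nil => rw [zipPad, F, List.map_cons, List.sum_cons, ih []]
    | cons c cs => rw [zipPad, F, List.map_cons, List.sum_cons, ih cs]

-- B's double loop over any rows list computes the row-major dA sum
theorem B_core (rows : List (String × String)) :
    (List.range ((rows.map (fun pc => max pc.1.toList.length pc.2.toList.length)).foldr max 0)).foldl
      (fun total j =>
        rows.foldl (fun total pc =>
          if j < pc.1.toList.length ∧ j < pc.2.toList.length then
            (if pc.1.toList.getD j ' ' != pc.2.toList.getD j ' ' then total + 1 else total)
          else if j < pc.1.toList.length ∨ j < pc.2.toList.length then total + 1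
          else total) total) 0
    = (rows.map (fun pc => dA pc.1 pc.2)).sum := by
  set width := (rows.map (fun pc => max pc.1.toList.length pc.2.toList.length)).foldr max 0 with hwidth
  have houter : ∀ (l : List Nat) (t : Int), l.foldl (fun total j =>
      rows.foldl (fun total pc =>
        if j < pc.1.toList.length ∧ j < pc.2.toList.length then
          (if pc.1.toList.getD j ' ' != pc.2.toList.getD j ' ' then total + 1 else total)
        else if j < pc.1.toList.length ∨ j < pc.2.toList.length then total + 1
        else total) total) t
      = t + (l.map (fun j => (rows.map (cell j)).sum)).sum := by
    intro l
    induction l with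
    | nil => intro t; simp
    | cons j js ihl =>
      intro t
      rw [List.foldl_cons, inner_foldl_eq, ihl, List.map_cons, List.sum_cons, add_assoc]
  rw [houter, zero_add, sum_swap]
  refine congrArg List.sum (List.map_congr_left ?_)
  intro pc hpc
  rw [dA_eq_dAL]
  simp only [cell_eq_cellL]
  apply rowL
  apply le_foldr_max
  exact List.mem_map.mpr ⟨pc, hpc, rfl⟩

theorem code_diff_alt_eq_F (prev_code cur_code : List String) :
    code_diff_alt prev_code cur_code = F prev_code cur_code := by
  refine Eq.trans (b := ((rowsOf prev_code cur_code).map (fun pc => dA pc.1 pc.2)).sum) ?_ ?_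
  · exact B_core (rowsOf prev_code cur_code)
  · rw [rowsOf_eq_zipPad, sum_zipPad_dA]

-- ===== VERDICT (by name: the statement is the Claim_ definition above) =====
theorem code_diff_spec : Claim_equal_code_diff := by
  intro prev_code cur_code _
  unfold Spec_code_diff
  rw [code_diff_eq_F, code_diff_alt_eq_F]
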